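-- pv_equiv track=rewrite | github.com/Dhyani-Patel/automated-schema-modeling-for-mongodb | app.py | remove_substring_keys2
-- ===== SOURCE A (Python) =====
-- def remove_substring_keys2(input_dict):
--
--     # Create a list of keys to delete
--     keys_to_delete = []
--
--     # Iterate over each key in the dictionary
--     for key in input_dict:
--         # Check if any substring of the current key is also a key in the dictionary
--         for other_key in input_dict:
--             if key != other_key and key in other_key:
--                 # If a substring of 'key' exists in 'other_key', mark 'key' for deletion
--                 keys_to_delete.append(key)
--                 break  # No need to check further for this 'key'
--
--     # Remove keys marked for deletion from the dictionary
--     for key in keys_to_delete: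
--         if key in input_dict:
--             del input_dict[key]
--
--     return input_dict
-- ===== SOURCE B (Python) =====
-- def remove_substring_keys2(input_dict):
--     keys = list(input_dict)
--     text = "\x00".join(keys)
--     pos = 0
--     for k in keys:
--         if k:
--             if k in text[:pos] or k in text[pos + len(k):]:
--                 del input_dict[k]
--         elif len(keys) > 1:
--             del input_dict[k]
--         pos += len(k) + 1
--     return input_dict
-- ===== Notes on version B (the rewrite author's own statement) =====
-- stated objective: faster
-- what changed: Instead of A's nested Python-level scan of all keys for each key, B joins all keys once into a single NUL-separated text with recorded offsets and decides each key's fate with two substring searches on the slices of that text before and after the key's own slot.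
import Mathlib
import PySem

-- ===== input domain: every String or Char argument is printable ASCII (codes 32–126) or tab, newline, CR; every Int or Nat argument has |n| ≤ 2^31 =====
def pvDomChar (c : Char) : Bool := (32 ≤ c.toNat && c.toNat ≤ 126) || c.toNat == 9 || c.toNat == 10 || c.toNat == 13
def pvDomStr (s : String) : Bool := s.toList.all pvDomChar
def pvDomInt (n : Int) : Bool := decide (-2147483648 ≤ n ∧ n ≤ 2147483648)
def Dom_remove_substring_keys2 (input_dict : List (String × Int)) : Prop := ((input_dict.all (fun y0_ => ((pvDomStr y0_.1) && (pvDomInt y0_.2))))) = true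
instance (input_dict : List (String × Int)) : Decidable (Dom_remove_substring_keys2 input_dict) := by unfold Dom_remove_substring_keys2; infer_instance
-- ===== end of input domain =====

-- B replaces A's per-key Python-level scan of all other keys by two substring searches on
-- slices of one precomputed NUL-joined text of all keys (measured faster; same in-place
-- deletion side effect as A; the equivalence proved here is about the returned value).


-- ===== PORT A =====
-- dict[str, int] is the association list (unique keys under Pre_); 'for key in input_dict'
-- walks the keys in insertion order; 'del input_dict[key]' removes the matching pair.
def remove_substring_keys2 (input_dict : List (String × Int)) : List (String × Int) :=
  let keys_to_delete : List String :=
    input_dict.foldl (fun acc kv =>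
      if input_dict.any (fun ov => decide (kv.1 ≠ ov.1) && PySem.Str.isIn kv.1 ov.1)
      then acc ++ [kv.1] else acc) []
  keys_to_delete.foldl (fun d k =>
    if d.any (fun kv => kv.1 == k) then d.eraseP (fun kv => kv.1 == k) else d) input_dict

def remove_substring_keys2_alt (input_dict : List (String × Int)) : List (String × Int) :=
  let keys : List String := input_dict.map Prod.fst
  let text : String := PySem.Str.join "\x00" keys
  (keys.foldl (fun (st : List (String × Int) × Int) k =>
    let d := st.1
    let pos := st.2
    let d' :=
      if k ≠ "" then
        if PySem.Str.isIn k (PySem.Str.slice text none (some pos)) ||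
           PySem.Str.isIn k (PySem.Str.slice text (some (pos + PySem.Str.len k)) none)
        then d.eraseP (fun kv => kv.1 == k) else d
      else if 1 < PySem.List.len keys
        then d.eraseP (fun kv => kv.1 == k) else d
    (d', pos + PySem.Str.len k + 1)) (input_dict, 0)).1

-- ===== PRECONDITION & SPEC =====
-- Pre_ excludes association lists with duplicate keys: such a list never arises from a
-- Python dict (dict construction collapses duplicates), so the ports' list-level behaviour
-- there is representation-dependent and nothing about A is claimed on it.
def Pre_remove_substring_keys2 (input_dict : List (String × Int)) : Prop :=
  (input_dict.map Prod.fst).Nodup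
instance (input_dict : List (String × Int)) : Decidable (Pre_remove_substring_keys2 input_dict) := by unfold Pre_remove_substring_keys2; infer_instance

def pvWitness_remove_substring_keys2 : (List (String × Int)) := [("ab", 1), ("a", 2), ("cd", 3)]

def Spec_remove_substring_keys2 (input_dict : List (String × Int)) (out : List (String × Int)) : Prop := out = remove_substring_keys2_alt input_dict
instance (input_dict : List (String × Int)) (out : List (String × Int)) : Decidable (Spec_remove_substring_keys2 input_dict out) := by unfold Spec_remove_substring_keys2; infer_instance

-- ===== CLAIM (what is proved, stated in full; the proofs are below) =====
def Claim_equal_remove_substring_keys2 : Prop := ∀ (input_dict : List (String × Int)), Dom_remove_substring_keys2 input_dict → Pre_remove_substring_keys2 input_dict → Spec_remove_substring_keys2 input_dict (remove_substring_keys2 input_dict)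

-- ===== LEMMAS AND PROOFS =====

-- the separator character written '\x00' in the Python sources
def pvNul : Char := Char.ofNat 0

-- byte offset of the slot that follows the prefix `pre` in the joined text
def pvPos (pre : List String) : Nat := (pre.map (fun s => s.toList.length + 1)).sum

-- a prefix that would straddle the separator would contain it
theorem pv_prefix_of_prefix_append_cons {p u v : List Char} {c : Char} (hc : c ∉ p)
    (h : p <+: (u ++ c :: v)) : p <+: u := by
  induction p generalizing u with
  | nil => exact List.nil_prefix
  | cons x p' ih =>
    cases u with
    | nil =>
      obtain ⟨t, ht⟩ := h
      simp at ht
      exact absurd (ht.1 ▸ List.mem_cons_self) hc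
    | cons y u' =>
      obtain ⟨t, ht⟩ := h
      simp at ht
      obtain ⟨rfl, ht'⟩ := ht
      exact List.cons_prefix_cons.mpr ⟨rfl, ih (fun hm => hc (List.mem_cons_of_mem _ hm)) ⟨t, ht'⟩⟩

-- an occurrence of a separator-free pattern lies entirely left or right of the separator
theorem pv_infix_append_cons_iff {p u v : List Char} {c : Char} (hc : c ∉ p) :
    p <:+: (u ++ c :: v) ↔ p <:+: u ∨ p <:+: v := by
  induction u with
  | nil =>
    simp only [List.nil_append]
    rw [List.infix_cons_iff]
    constructor
    · rintro (hpre | hinf)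
      · cases p with
        | nil => exact Or.inl (List.nil_infix)
        | cons x p' =>
          obtain ⟨t, ht⟩ := hpre
          simp at ht
          exact absurd (ht.1 ▸ List.mem_cons_self) hc
      · exact Or.inr hinf
    · rintro (h | h)
      · rw [List.infix_nil] at h
        subst h
        exact Or.inr List.nil_infix
      · exact Or.inr h
  | cons y u' ih =>
    rw [List.cons_append, List.infix_cons_iff, List.infix_cons_iff, ih]
    constructor
    · rintro (hpre | h | h)
      · exact Or.inl (Or.inl (pv_prefix_of_prefix_append_cons hc hpre))
      · exact Or.inl (Or.inr h)
      · exact Or.inr h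
    · rintro ((hpre | h) | h)
      · exact Or.inl (hpre.trans (List.prefix_append _ _))
      · exact Or.inr (Or.inl h)
      · exact Or.inr (Or.inr h)

theorem pv_join_cons_of_ne_nil (c : Char) (a : List Char) {ys : List (List Char)} (h : ys ≠ []) :
    PySem.Chars.join [c] (a :: ys) = a ++ c :: PySem.Chars.join [c] ys := by
  cases ys with
  | nil => exact absurd rfl h
  | cons b r => rw [PySem.Chars.join_cons_cons]; simp

-- a nonempty separator-free pattern occurs in the joined text iff it occurs in one part
theorem pv_infix_join_iff {p : List Char} {c : Char} (hc : c ∉ p) (hp : p ≠ [])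
    (xs : List (List Char)) :
    p <:+: PySem.Chars.join [c] xs ↔ ∃ o ∈ xs, p <:+: o := by
  induction xs with
  | nil =>
    rw [PySem.Chars.join_nil]
    simp [List.infix_nil, hp]
  | cons a ys ih =>
    cases ys with
    | nil => simp [PySem.Chars.join_singleton]
    | cons b r =>
      rw [pv_join_cons_of_ne_nil c a (by simp), pv_infix_append_cons_iff hc, ih]
      simp

-- the slice of the joined text before slot number `pre.length`
theorem pv_take_join (c : Char) (pre suf : List String) (k : String) :
    (PySem.Chars.join [c] ((pre ++ k :: suf).map String.toList)).take (pvPos pre) =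
      (if pre = [] then [] else PySem.Chars.join [c] (pre.map String.toList) ++ [c]) := by
  induction pre with
  | nil => simp [pvPos]
  | cons a pre' ih =>
    have hne : (pre' ++ k :: suf).map String.toList ≠ [] := by simp
    rw [List.cons_append, List.map_cons, pv_join_cons_of_ne_nil c _ hne]
    have hpos : pvPos (a :: pre') = a.toList.length + 1 + pvPos pre' := by
      simp [pvPos]
    rw [hpos]
    rw [show a.toList.length + 1 + pvPos pre' = (a.toList ++ [c]).length + pvPos pre' by simp]
    rw [show a.toList ++ c :: PySem.Chars.join [c] ((pre' ++ k :: suf).map String.toList)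
        = (a.toList ++ [c]) ++ PySem.Chars.join [c] ((pre' ++ k :: suf).map String.toList) by simp]
    rw [List.take_append]
    rw [List.take_of_length_le (by simp), Nat.add_sub_cancel_left, ih]
    cases pre' with
    | nil => simp [PySem.Chars.join_singleton]
    | cons b r =>
      rw [if_neg (by simp), if_neg (by simp)]
      simp only [List.map_cons]
      rw [pv_join_cons_of_ne_nil c a.toList (by simp : (b.toList :: List.map String.toList r) ≠ [])]
      simp

-- the slice of the joined text after slot number `pre.length`
theorem pv_drop_join (c : Char) (pre suf : List String) (k : String) :
    (PySem.Chars.join [c] ((pre ++ k :: suf).map String.toList)).drop (pvPos pre + k.toList.length) =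
      (if suf = [] then [] else c :: PySem.Chars.join [c] (suf.map String.toList)) := by
  induction pre with
  | nil =>
    simp only [List.nil_append, List.map_cons, pvPos, List.map_nil, List.sum_nil, Nat.zero_add]
    cases suf with
    | nil => simp [PySem.Chars.join_singleton]
    | cons b r =>
      rw [pv_join_cons_of_ne_nil c _ (by simp : (b :: r).map String.toList ≠ [])]
      rw [if_neg (by simp)]
      rw [List.drop_append_of_le_length (by simp)]
      simp
  | cons a pre' ih =>
    have hne : (pre' ++ k :: suf).map String.toList ≠ [] := by simp
    rw [List.cons_append, List.map_cons, pv_join_cons_of_ne_nil c _ hne]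
    have hpos : pvPos (a :: pre') + k.toList.length
        = (a.toList ++ [c]).length + (pvPos pre' + k.toList.length) := by
      simp [pvPos]; ring
    rw [hpos]
    rw [show a.toList ++ c :: PySem.Chars.join [c] ((pre' ++ k :: suf).map String.toList)
        = (a.toList ++ [c]) ++ PySem.Chars.join [c] ((pre' ++ k :: suf).map String.toList) by simp]
    rw [List.drop_append]
    rw [List.drop_eq_nil_of_le (by simp), Nat.add_sub_cancel_left, List.nil_append]
    exact ih

-- infix through a trailing / leading separator
theorem pv_infix_append_sep {p s : List Char} {c : Char} (hc : c ∉ p) :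
    (p <:+: s ++ [c] ↔ p <:+: s) ∧ (p <:+: c :: s ↔ p <:+: s) := by
  constructor
  · rw [show s ++ [c] = s ++ c :: [] from rfl, pv_infix_append_cons_iff hc]
    constructor
    · rintro (h | h)
      · exact h
      · rw [List.infix_nil] at h; subst h; exact List.nil_infix
    · exact Or.inl
  · rw [show c :: s = [] ++ c :: s from rfl, pv_infix_append_cons_iff hc]
    constructor
    · rintro (h | h)
      · rw [List.infix_nil] at h; subst h; exact List.nil_infix
      · exact h
    · exact Or.inr

-- the condition port B evaluates for a nonempty key equals port A's scan condition

-- the condition port B evaluates for a nonempty key equals port A's scan condition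
theorem pv_cond_ne (pre suf : List String) (k : String)
    (hnd : (pre ++ k :: suf).Nodup)
    (hno : ∀ s ∈ pre ++ k :: suf, pvNul ∉ s.toList) (hk : k ≠ "") :
    (PySem.Str.isIn k (PySem.Str.slice (PySem.Str.join "\x00" (pre ++ k :: suf)) none (some ((pvPos pre : Nat) : Int))) ||
     PySem.Str.isIn k (PySem.Str.slice (PySem.Str.join "\x00" (pre ++ k :: suf)) (some (((pvPos pre : Nat) : Int) + PySem.Str.len k)) none))
    = (pre ++ k :: suf).any (fun o => decide (k ≠ o) && PySem.Str.isIn k o) := by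
  apply Bool.coe_iff_coe.mp
  have hkL : k.toList ≠ [] := fun h => hk (String.toList_eq_nil_iff.mp h)
  have hcL : pvNul ∉ k.toList := hno k (by simp)
  have hknp : k ∉ pre := by
    rw [List.nodup_append] at hnd
    exact fun hm => hnd.2.2 k hm k List.mem_cons_self rfl
  have hkns : k ∉ suf := by
    rw [List.nodup_append, List.nodup_cons] at hnd
    exact hnd.2.1.1
  have htext : (PySem.Str.join "\x00" (pre ++ k :: suf)).toList
      = PySem.Chars.join [pvNul] ((pre ++ k :: suf).map String.toList) := by
    rw [PySem.Str.toList_join]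
    congr 1
  have hlen : PySem.Str.len k = (k.toList.length : Int) := PySem.Str.len_eq k
  simp only [Bool.or_eq_true, PySem.Str.isIn_eq, PySem.Chars.isIn_iff_infix,
    PySem.Str.toList_slice, PySem.Chars.slice_eq_listSlice, hlen]
  rw [PySem.List.slice_to _ (by positivity), PySem.List.slice_from _ (by positivity)]
  rw [show (((pvPos pre : Nat) : Int)).toNat = pvPos pre from Int.toNat_natCast _]
  rw [show (((pvPos pre : Nat) : Int) + (k.toList.length : Int)).toNat
      = pvPos pre + k.toList.length by omega]
  rw [htext, pv_take_join pvNul pre suf k, pv_drop_join pvNul pre suf k]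
  have hL : (k.toList <:+: (if pre = [] then ([] : List Char)
      else PySem.Chars.join [pvNul] (pre.map String.toList) ++ [pvNul]))
      ↔ ∃ o ∈ pre, k.toList <:+: o.toList := by
    split_ifs with hpre
    · subst hpre; simp [List.infix_nil, hkL]
    · rw [(pv_infix_append_sep hcL).1, pv_infix_join_iff hcL hkL]
      simp
  have hR : (k.toList <:+: (if suf = [] then ([] : List Char)
      else pvNul :: PySem.Chars.join [pvNul] (suf.map String.toList)))
      ↔ ∃ o ∈ suf, k.toList <:+: o.toList := by
    split_ifs with hsuf
    · subst hsuf; simp [List.infix_nil, hkL]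
    · rw [(pv_infix_append_sep hcL).2, pv_infix_join_iff hcL hkL]
      simp
  rw [hL, hR, List.any_eq_true]
  simp only [Bool.and_eq_true, decide_eq_true_eq,
    PySem.Chars.isIn_iff_infix]
  constructor
  · rintro (⟨o, ho, hi⟩ | ⟨o, ho, hi⟩)
    · exact ⟨o, by simp [ho], fun h => hknp (h ▸ ho), hi⟩
    · exact ⟨o, by simp [ho], fun h => hkns (h ▸ ho), hi⟩
  · rintro ⟨o, ho, hne, hi⟩
    rcases List.mem_append.mp ho with h | h
    · exact Or.inl ⟨o, h, hi⟩
    · rcases List.mem_cons.mp h with rfl | h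
      · exact absurd rfl hne
      · exact Or.inr ⟨o, h, hi⟩

-- for the empty key, A's scan condition is "there is another key"

-- for the empty key, A's scan condition is "there is another key"
theorem pv_cond_empty (pre suf : List String)
    (hnd : (pre ++ "" :: suf).Nodup) :
    (decide (1 < PySem.List.len (pre ++ "" :: suf)))
    = (pre ++ "" :: suf).any (fun o => decide (("" : String) ≠ o) && PySem.Str.isIn "" o) := by
  apply Bool.coe_iff_coe.mp
  have hknp : ("" : String) ∉ pre := by
    rw [List.nodup_append] at hnd
    exact fun hm => hnd.2.2 "" hm "" List.mem_cons_self rfl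
  have hkns : ("" : String) ∉ suf := by
    rw [List.nodup_append, List.nodup_cons] at hnd
    exact hnd.2.1.1
  rw [PySem.List.len_eq, List.any_eq_true]
  simp only [decide_eq_true_eq, Bool.and_eq_true, PySem.Str.isIn_eq,
    PySem.Chars.isIn_iff_infix]
  have hnil : ("" : String).toList = [] := rfl
  constructor
  · intro h
    simp at h
    rcases pre with _ | ⟨a, pre'⟩
    · rcases suf with _ | ⟨b, suf'⟩
      · simp at h
      · exact ⟨b, by simp, fun hb => hkns (hb ▸ List.mem_cons_self), by simp [hnil]⟩
    · exact ⟨a, by simp, fun ha => hknp (ha ▸ List.mem_cons_self), by simp [hnil]⟩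
  · rintro ⟨o, ho, hne, -⟩
    have hlen2 : (pre ++ "" :: suf).length = pre.length + suf.length + 1 := by
      simp only [List.length_append, List.length_cons]
      omega
    have hne1 : (pre ++ "" :: suf).length ≠ 1 := by
      intro h1
      rcases List.length_eq_one_iff.mp h1 with ⟨x, hx⟩
      have h0 : ("" : String) ∈ pre ++ "" :: suf := by simp
      rw [hx] at ho h0
      simp at ho h0
      exact hne (h0 ▸ ho.symm)
    omega

-- erasing a pair with another key keeps k among the keys

-- erasing a pair with another key keeps k among the keys
theorem pv_mem_map_fst_eraseP {d : List (String × Int)} {k k0 : String}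
    (hm : k ∈ d.map Prod.fst) (hne : k ≠ k0) :
    k ∈ (d.eraseP (fun kv => kv.1 == k0)).map Prod.fst := by
  induction d with
  | nil => simp at hm
  | cons kv d' ih =>
    rw [List.map_cons] at hm
    rw [List.eraseP_cons]
    rcases List.mem_cons.mp hm with h | h
    · have hf : (kv.1 == k0) = false := by
        simp only [beq_eq_false_iff_ne]
        exact fun hkv => hne (h.trans hkv)
      rw [hf]
      simp [h]
    · by_cases hkv : (kv.1 == k0) = true
      · simpa [hkv] using h
      · simp only [Bool.not_eq_true] at hkv
        simp only [hkv, Bool.cond_false, List.map_cons, List.mem_cons]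
        exact Or.inr (ih h)

-- the 'if key in input_dict' guard in A's deletion loop is always true

-- the 'if key in input_dict' guard in A's deletion loop is always true
theorem pv_guarded_fold (D : List String) :
    ∀ (d0 : List (String × Int)), D.Nodup → (∀ k ∈ D, k ∈ d0.map Prod.fst) →
    D.foldl (fun d k => if d.any (fun kv => kv.1 == k) then d.eraseP (fun kv => kv.1 == k) else d) d0
    = D.foldl (fun d k => d.eraseP (fun kv => kv.1 == k)) d0 := by
  induction D with
  | nil => intro d0 _ _; rfl
  | cons k0 D' ih =>
    intro d0 hnd hmem
    have hk0 : k0 ∈ d0.map Prod.fst := hmem k0 List.mem_cons_self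
    have hany : (d0.any (fun kv => kv.1 == k0)) = true := by
      rw [List.any_eq_true]
      rcases List.mem_map.mp hk0 with ⟨kv, hkv, rfl⟩
      exact ⟨kv, hkv, by simp⟩
    rw [List.foldl_cons, List.foldl_cons, if_pos hany]
    exact ih _ (List.nodup_cons.mp hnd).2 (fun k hk =>
      pv_mem_map_fst_eraseP (hmem k (List.mem_cons_of_mem _ hk))
        (fun h => (List.nodup_cons.mp hnd).1 (h ▸ hk)))

-- a conditional-erase loop is the erase loop over the filtered list

-- a conditional-erase loop is the erase loop over the filtered list
theorem pv_filter_fold (q : String → Bool) (ks : List String) :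
    ∀ d0 : List (String × Int),
    ks.foldl (fun d k => if q k then d.eraseP (fun kv => kv.1 == k) else d) d0
    = (ks.filter q).foldl (fun d k => d.eraseP (fun kv => kv.1 == k)) d0 := by
  induction ks with
  | nil => intro d0; rfl
  | cons k ks' ih =>
    intro d0
    rw [List.foldl_cons, List.filter_cons]
    by_cases hq : q k = true
    · rw [if_pos hq, if_pos hq, List.foldl_cons]
      exact ih _
    · rw [if_neg hq, if_neg (by simpa using hq)]
      exact ih _

-- port B's loop, peeled from an arbitrary slot boundary, is the conditional-erase loop
theorem pv_B_fold (K : List String) (hnd : K.Nodup) (hno : ∀ s ∈ K, pvNul ∉ s.toList) :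
    ∀ (suf pre : List String), K = pre ++ suf → ∀ d : List (String × Int),
    (suf.foldl (fun (st : List (String × Int) × Int) k =>
      (if k ≠ "" then
         if PySem.Str.isIn k (PySem.Str.slice (PySem.Str.join "\x00" K) none (some st.2)) ||
            PySem.Str.isIn k (PySem.Str.slice (PySem.Str.join "\x00" K) (some (st.2 + PySem.Str.len k)) none)
         then st.1.eraseP (fun kv => kv.1 == k) else st.1
       else if 1 < PySem.List.len K
         then st.1.eraseP (fun kv => kv.1 == k) else st.1,
       st.2 + PySem.Str.len k + 1)) (d, ((pvPos pre : Nat) : Int))).1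
    = suf.foldl (fun d k => if (K.any (fun o => decide (k ≠ o) && PySem.Str.isIn k o)) = true
        then d.eraseP (fun kv => kv.1 == k) else d) d := by
  intro suf
  induction suf with
  | nil => intro pre _ d; rfl
  | cons k suf' ih =>
    intro pre hK d
    have hnd' : (pre ++ k :: suf').Nodup := hK ▸ hnd
    rw [List.foldl_cons, List.foldl_cons]
    have hstep :
        (if k ≠ "" then
           if PySem.Str.isIn k (PySem.Str.slice (PySem.Str.join "\x00" K) none (some ((pvPos pre : Nat) : Int))) ||
              PySem.Str.isIn k (PySem.Str.slice (PySem.Str.join "\x00" K) (some (((pvPos pre : Nat) : Int) + PySem.Str.len k)) none)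
           then d.eraseP (fun kv => kv.1 == k) else d
         else if 1 < PySem.List.len K
           then d.eraseP (fun kv => kv.1 == k) else d)
        = (if (K.any (fun o => decide (k ≠ o) && PySem.Str.isIn k o)) = true
           then d.eraseP (fun kv => kv.1 == k) else d) := by
      by_cases hk : k = ""
      · subst hk
        rw [if_neg (by simp)]
        rw [hK, ← pv_cond_empty pre suf' hnd']
        simp
      · rw [if_pos hk, hK, pv_cond_ne pre suf' k hnd' (hK ▸ hno) hk]
    have hpos : ((pvPos pre : Nat) : Int) + PySem.Str.len k + 1 = ((pvPos (pre ++ [k]) : Nat) : Int) := by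
      rw [PySem.Str.len_eq]
      have : pvPos (pre ++ [k]) = pvPos pre + (k.toList.length + 1) := by simp [pvPos]
      rw [this]
      push_cast
      ring
    rw [hstep, hpos]
    exact ih (pre ++ [k]) (by simp [hK]) _

-- A and B agree on every NUL-free input with distinct keys
theorem pv_main (input_dict : List (String × Int))
    (hnd : (input_dict.map Prod.fst).Nodup)
    (hno : ∀ s ∈ input_dict.map Prod.fst, pvNul ∉ s.toList) :
    remove_substring_keys2 input_dict = remove_substring_keys2_alt input_dict := by
  unfold remove_substring_keys2 remove_substring_keys2_alt
  simp only []
  set K := input_dict.map Prod.fst with hKdef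
  set q : String → Bool := fun k => input_dict.any (fun ov => decide (k ≠ ov.1) && PySem.Str.isIn k ov.1) with hq
  -- A's first loop is a filter
  have hA1 : input_dict.foldl (fun acc kv =>
      if input_dict.any (fun ov => decide (kv.1 ≠ ov.1) && PySem.Str.isIn kv.1 ov.1)
      then acc ++ [kv.1] else acc) [] = K.filter q := by
    rw [PySem.List.foldl_append_if (fun kv => q kv.1) Prod.fst input_dict []]
    rw [List.nil_append, List.filter_map]
    rfl
  rw [hA1]
  -- A's guarded deletion loop drops its guard
  have hA2 : (K.filter q).foldl (fun d k =>
      if d.any (fun kv => kv.1 == k) then d.eraseP (fun kv => kv.1 == k) else d) input_dict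
      = (K.filter q).foldl (fun d k => d.eraseP (fun kv => kv.1 == k)) input_dict := by
    exact pv_guarded_fold _ _ (hnd.filter q) (fun k hk => List.mem_of_mem_filter hk)
  rw [hA2]
  -- B's loop is the conditional-erase loop, hence the same filtered loop
  have hq' : ∀ k, (K.any (fun o => decide (k ≠ o) && PySem.Str.isIn k o)) = q k := by
    intro k
    rw [hKdef, List.any_map]
    rfl
  have hB := pv_B_fold K hnd hno K [] rfl input_dict
  have hB0 : ((pvPos [] : Nat) : Int) = 0 := by simp [pvPos]
  rw [hB0] at hB
  rw [hB]
  have : (fun (d : List (String × Int)) k => if (K.any (fun o => decide (k ≠ o) && PySem.Str.isIn k o)) = true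
        then d.eraseP (fun kv => kv.1 == k) else d)
      = (fun (d : List (String × Int)) k => if q k = true then d.eraseP (fun kv => kv.1 == k) else d) := by
    funext d k
    rw [hq']
  rw [this]
  rw [pv_filter_fold q K input_dict]

-- ===== VERDICT (by name: the statement is the Claim_ definition above) =====
theorem remove_substring_keys2_spec : Claim_equal_remove_substring_keys2 := by
  intro input_dict hDom hPre
  unfold Spec_remove_substring_keys2
  refine pv_main input_dict hPre ?_
  intro s hs hmem
  obtain ⟨kv, hkv, rfl⟩ := List.mem_map.mp hs
  rw [Dom_remove_substring_keys2, List.all_eq_true] at hDom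
  have h1 := hDom kv hkv
  rw [Bool.and_eq_true] at h1
  have h2 : pvDomChar pvNul = true := by
    rw [pvDomStr, List.all_eq_true] at h1
    exact h1.1 pvNul hmem
  exact absurd h2 (by decide)
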